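-- pv_equiv track=rewrite | github.com/buglenka/python-exercises | ImageOverlap.py | right_down_sums
-- ===== SOURCE A (Python) =====
-- from typing import List
--
-- def sum1(A: List[List[int]], B: List[List[int]],
--                         bound1: int, bound2: int, maxbound: int) -> int:
--     sum = 0
--     for rx, ry in zip(A[:maxbound-bound2], B[bound2:]):
--         for x, y in zip(rx[:maxbound-bound1], ry[bound1:]):
--             if x == y == 1:
--                 sum += 1
--
--     return sum
--
-- def right_down_sums(A: List[List[int]], B: List[List[int]]) -> int:
--     size = len(A)
--     max_sum = 0
--
--     for dir1 in range(size):
--         sum = 0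
--         for dir2 in range(size):
--             if dir1 == dir2 == 0:
--                 continue
--
--             # count sum for this position
--             max_sum = max(max_sum, sum1(A, B, dir1, dir2, size))
--
--     return max_sum
-- ===== SOURCE B (Python) =====
-- from typing import List
--
-- def right_down_sums(A: List[List[int]], B: List[List[int]]) -> int:
--     size = len(A)
--     ones_a = [(i, j) for i, row in enumerate(A) for j, v in enumerate(row) if v == 1]
--     set_b = {(p, q) for p, row in enumerate(B) for q, v in enumerate(row) if v == 1}
--     best = 0
--     for d1 in range(size):
--         for d2 in range(size):
--             if d1 == 0 and d2 == 0:
--                 continue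
--             c = 0
--             for i, j in ones_a:
--                 if i + d2 < size and j + d1 < size and (i + d2, j + d1) in set_b:
--                     c += 1
--             best = max(best, c)
--     return best
-- ===== Notes on version B (the rewrite author's own statement) =====
-- stated objective: faster
-- what changed: Replaces the per-offset zip-of-slices rescan of both full matrices by a sparse formulation: the 1-cells of A are listed once and the 1-cells of B are hashed into a set once, and each offset is scored by one pass over A's 1-cells with a set lookup.
import Mathlib
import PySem

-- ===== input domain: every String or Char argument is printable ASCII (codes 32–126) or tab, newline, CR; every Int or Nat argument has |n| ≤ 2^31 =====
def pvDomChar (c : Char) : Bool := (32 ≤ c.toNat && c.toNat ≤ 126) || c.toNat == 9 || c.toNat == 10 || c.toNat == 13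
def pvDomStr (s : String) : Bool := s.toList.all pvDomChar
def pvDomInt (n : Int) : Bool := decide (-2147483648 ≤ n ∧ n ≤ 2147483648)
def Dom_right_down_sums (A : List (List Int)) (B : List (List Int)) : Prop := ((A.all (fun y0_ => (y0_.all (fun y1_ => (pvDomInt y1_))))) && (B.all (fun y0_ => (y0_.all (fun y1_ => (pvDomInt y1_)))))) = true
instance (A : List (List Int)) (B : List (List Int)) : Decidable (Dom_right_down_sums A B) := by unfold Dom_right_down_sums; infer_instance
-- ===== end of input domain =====

-- B replaces A's per-offset rescans of both matrices with precomputed 1-cell lists/sets (faster; return value proved equal).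
-- ===== PORT A =====
-- helper: Python sum1 (zip of slices, nested counting loop)
def pySum1 (A : List (List Int)) (B : List (List Int)) (bound1 bound2 maxbound : Int) : Int :=
  (List.zip (PySem.List.slice A none (some (maxbound - bound2))) (PySem.List.slice B (some bound2) none)).foldl
    (fun sum rxy =>
      (List.zip (PySem.List.slice rxy.1 none (some (maxbound - bound1))) (PySem.List.slice rxy.2 (some bound1) none)).foldl
        (fun sum xy => if xy.1 == xy.2 && xy.2 == 1 then sum + 1 else sum) sum) 0

def right_down_sums (A : List (List Int)) (B : List (List Int)) : Int :=
  let size : Int := A.length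
  (PySem.List.pyRange 0 size 1).foldl (fun max_sum dir1 =>
    (PySem.List.pyRange 0 size 1).foldl (fun max_sum dir2 =>
      if dir1 == 0 && dir2 == 0 then max_sum
      else max max_sum (pySum1 A B dir1 dir2 size)) max_sum) 0

-- ===== PORT B =====
-- B-side helper: the 1-cells of a matrix as (row, col) pairs (a flat comprehension)
def altOnes (M : List (List Int)) : List (Int × Int) :=
  (PySem.List.enumerate M 0).flatMap (fun ir =>
    (PySem.List.enumerate ir.2 0).filterMap (fun jv => if jv.2 == 1 then some (ir.1, jv.1) else none))

def right_down_sums_alt (A : List (List Int)) (B : List (List Int)) : Int :=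
  let size : Int := A.length
  let onesA := altOnes A
  let setB : PySem.Set (Int × Int) := PySem.Set.ofList (altOnes B)
  (PySem.List.pyRange 0 size 1).foldl (fun best d1 =>
    (PySem.List.pyRange 0 size 1).foldl (fun best d2 =>
      if d1 == 0 && d2 == 0 then best
      else
        let c := onesA.foldl (fun c ij =>
          if ij.1 + d2 < size ∧ ij.2 + d1 < size ∧ (ij.1 + d2, ij.2 + d1) ∈ setB then c + 1 else c) 0
        max best c) best) 0

-- ===== PRECONDITION & SPEC =====
def Spec_right_down_sums (A : List (List Int)) (B : List (List Int)) (out : Int) : Prop := out = right_down_sums_alt A B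
instance (A : List (List Int)) (B : List (List Int)) (out : Int) : Decidable (Spec_right_down_sums A B out) := by unfold Spec_right_down_sums; infer_instance

-- ===== CLAIM (what is proved, stated in full; the proofs are below) =====
def Claim_equal_right_down_sums : Prop := ∀ (A : List (List Int)) (B : List (List Int)), Dom_right_down_sums A B → Spec_right_down_sums A B (right_down_sums A B)

-- ===== LEMMAS AND PROOFS =====

-- the count of matches of one offset, as a count over the column indices of one row of A
def fcnt (Bm : List (List Int)) (a b n i : Nat) (row : List Int) : Nat :=
  (List.range row.length).countP
    (fun j => decide (row[j]? = some 1 ∧ i + b < n ∧ j + a < n ∧ ((Bm[i+b]?.getD [])[j+a]? = some 1)))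

-- a sum over a zip is a sum over the index range of the shorter list
theorem zip_map_sum {α β : Type} (F : α × β → Nat) (d1 : α) (d2 : β) :
    ∀ (X : List α) (Y : List β),
      ((List.zip X Y).map F).sum
        = ((List.range (min X.length Y.length)).map (fun i => F (X.getD i d1, Y.getD i d2))).sum := by
  intro X
  induction X with
  | nil => intro Y; simp
  | cons x xt ih =>
    intro Y
    cases Y with
    | nil => simp
    | cons y yt =>
      simp only [List.zip_cons_cons, List.map_cons, List.sum_cons, ih yt, List.length_cons,
        Nat.succ_min_succ, List.range_succ_eq_map, List.map_map, Function.comp_def,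
        List.getD_cons_zero, List.getD_cons_succ]

-- counting matched 1-pairs in one zipped, sliced row, as a count over column indices
theorem row_cnt : ∀ (xs ys : List Int) (m : Nat),
    (List.zip (xs.take m) ys).countP (fun xy => xy.1 == xy.2 && xy.2 == 1)
      = (List.range xs.length).countP
          (fun j => decide (xs[j]? = some 1 ∧ j < m ∧ ys[j]? = some 1)) := by
  intro xs
  induction xs with
  | nil => intro ys m; simp
  | cons x xt ih =>
    intro ys m
    cases ys with
    | nil => simp
    | cons y yt =>
      cases m with
      | zero => simp
      | succ m' =>
        rw [List.take_succ_cons, List.zip_cons_cons]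
        simp only [List.countP_cons, List.length_cons, List.range_succ_eq_map,
          List.countP_map, Function.comp_def, List.getElem?_cons_succ,
          List.getElem?_cons_zero, ih yt m', Nat.succ_eq_add_one, Nat.add_lt_add_iff_right]
        have hm : (0:Nat) < m' + 1 := Nat.succ_pos m'
        have hif : (x == y && y == 1)
            = decide (some x = some (1 : Int) ∧ 0 < m' + 1 ∧ some y = some (1 : Int)) := by
          by_cases hx : x = 1 <;> by_cases hy : y = 1 <;> simp [hx, hy, hm]
        rw [hif]
        rfl

-- a tail of zero summands can be dropped
theorem sum_range_extend (f : Nat → Nat) (m n : Nat) (h : m ≤ n)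
    (h0 : ∀ i, m ≤ i → i < n → f i = 0) :
    ((List.range n).map f).sum = ((List.range m).map f).sum := by
  have hn : n = m + (n - m) := by omega
  rw [hn, List.range_add, List.map_append, List.sum_append, List.map_map]
  have hz : ((List.range (n - m)).map (f ∘ fun k => m + k)).sum = 0 := by
    apply List.sum_eq_zero
    intro x hx
    simp only [List.mem_map, List.mem_range, Function.comp_def] at hx
    obtain ⟨k, hk, rfl⟩ := hx
    exact h0 (m + k) (by omega) (by omega)
  rw [hz, Nat.add_zero]

-- membership in altOnes names an actual 1-cell of the matrix
theorem mem_altOnes (M : List (List Int)) (x : Int × Int) :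
    x ∈ altOnes M ↔ ∃ p q : Nat, x = (↑p, ↑q) ∧ (M[p]?.getD [])[q]? = some 1 := by
  unfold altOnes
  simp only [List.mem_flatMap, PySem.List.mem_enumerate_iff, List.mem_filterMap]
  constructor
  · rintro ⟨ir, ⟨p, hp, rfl⟩, jv, ⟨q, hq, rfl⟩, hif⟩
    simp only [zero_add] at hq hif
    by_cases h1 : M[p][q] = (1 : Int)
    · rw [if_pos (by simpa using h1)] at hif
      obtain rfl : x = ((p : Int), (q : Int)) := by simpa using hif.symm
      refine ⟨p, q, rfl, ?_⟩
      rw [List.getElem?_eq_getElem hp]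
      simp [List.getElem?_eq_getElem hq, h1]
    · rw [if_neg (by simpa using h1)] at hif
      exact absurd hif (by simp)
  · rintro ⟨p, q, rfl, hcell⟩
    cases hMp : M[p]? with
    | none => rw [hMp] at hcell; simp at hcell
    | some row =>
      rw [hMp] at hcell
      simp only [Option.getD_some] at hcell
      obtain ⟨hp, hrow⟩ := List.getElem?_eq_some_iff.mp hMp
      obtain ⟨hq', hval⟩ := List.getElem?_eq_some_iff.mp hcell
      have hq : q < M[p].length := by rw [hrow]; exact hq'
      have e : M[p][q]? = some 1 := by rw [hrow]; exact hcell
      have h1 : M[p][q] = 1 := Option.some.inj ((List.getElem?_eq_getElem hq).symm.trans e)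
      exact ⟨(0 + (p : Int), M[p]), ⟨p, hp, rfl⟩, (0 + (q : Int), M[p][q]), ⟨q, hq, rfl⟩,
        by simp [h1]⟩

-- A's sum1 at offset (a, b), as the canonical per-row count
theorem pySum1_eq (A B : List (List Int)) (a b : Nat) (ha : a < A.length) (hb : b < A.length) :
    pySum1 A B (a : Int) (b : Int) (A.length : Int)
      = (((List.range A.length).map (fun i => fcnt B a b A.length i (A.getD i []))).sum : Int) := by
  have hbe : ((A.length : Int) - (b : Int)) = ((A.length - b : Nat) : Int) := by omega
  have hae : ((A.length : Int) - (a : Int)) = ((A.length - a : Nat) : Int) := by omega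
  unfold pySum1
  rw [hbe, hae]
  simp only [PySem.List.slice_to_natCast, PySem.List.slice_from_natCast]
  have step1 : ∀ (init : Int) (rxy : List Int × List Int),
      (List.zip (rxy.1.take (A.length - a)) (rxy.2.drop a)).foldl
          (fun sum xy => if xy.1 == xy.2 && xy.2 == 1 then sum + 1 else sum) init
        = init + (((List.zip (rxy.1.take (A.length - a)) (rxy.2.drop a)).countP
            (fun xy => xy.1 == xy.2 && xy.2 == 1) : Nat) : Int) := by
    intro init rxy
    exact PySem.List.foldl_if_add_one _ _ _
  have e2 : (List.zip (A.take (A.length - b)) (B.drop b)).foldl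
      (fun sum rxy => (List.zip (rxy.1.take (A.length - a)) (rxy.2.drop a)).foldl
        (fun sum xy => if xy.1 == xy.2 && xy.2 == 1 then sum + 1 else sum) sum) 0
    = (List.zip (A.take (A.length - b)) (B.drop b)).foldl
      (fun s rxy => s + (((List.zip (rxy.1.take (A.length - a)) (rxy.2.drop a)).countP
          (fun xy => xy.1 == xy.2 && xy.2 == 1) : Nat) : Int)) 0 :=
    PySem.List.foldl_congr_mem _ _ _ _ (fun acc rxy _ => step1 acc rxy)
  rw [e2, PySem.List.foldl_add, zero_add]
  have keycast :
      ((List.zip (A.take (A.length - b)) (B.drop b)).map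
          (fun rxy => (((List.zip (rxy.1.take (A.length - a)) (rxy.2.drop a)).countP
            (fun xy => xy.1 == xy.2 && xy.2 == 1) : Nat) : Int))).sum
        = ((((List.zip (A.take (A.length - b)) (B.drop b)).map
            (fun rxy => (List.zip (rxy.1.take (A.length - a)) (rxy.2.drop a)).countP
              (fun xy => xy.1 == xy.2 && xy.2 == 1))).sum : Nat) : Int) := by
    rw [Nat.cast_list_sum, List.map_map]
    rfl
  rw [keycast]
  congr 1
  rw [zip_map_sum (fun rxy =>
        (List.zip (rxy.1.take (A.length - a)) (rxy.2.drop a)).countP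
          (fun xy => xy.1 == xy.2 && xy.2 == 1)) [] []]
  have hlen : min (A.take (A.length - b)).length (B.drop b).length
      = min (A.length - b) (B.length - b) := by
    simp only [List.length_take, List.length_drop]
    omega
  rw [hlen]
  rw [sum_range_extend (fun i => fcnt B a b A.length i (A.getD i []))
        (min (A.length - b) (B.length - b)) A.length (by omega) ?zero]
  case zero =>
    intro i hi hin
    unfold fcnt
    rw [List.countP_eq_zero]
    intro j _
    simp only [decide_eq_true_eq, not_and]
    intro _ h2 h3
    rcases (by omega : A.length - b ≤ i ∨ B.length - b ≤ i) with hc | hc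
    · omega
    · rw [List.getElem?_eq_none (by omega : B.length ≤ i + b)]
      simp
  apply congrArg
  apply List.map_congr_left
  intro i hi
  rw [List.mem_range] at hi
  have hib : i < A.length - b := by omega
  have hiB : i < B.length - b := by omega
  have hX : (A.take (A.length - b)).getD i [] = A.getD i [] := by
    rw [List.getD_eq_getElem?_getD, List.getD_eq_getElem?_getD, List.getElem?_take_of_lt hib]
  have hY : (B.drop b).getD i [] = B.getD (b + i) [] := by
    rw [List.getD_eq_getElem?_getD, List.getD_eq_getElem?_getD, List.getElem?_drop]
  rw [hX, hY, row_cnt]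
  unfold fcnt
  apply List.countP_congr
  intro j _
  simp only [decide_eq_true_eq]
  constructor
  · rintro ⟨h1, h2, h3⟩
    rw [List.getElem?_drop] at h3
    have h3' : (B.getD (b + i) [])[a + j]? = some 1 := h3
    rw [List.getD_eq_getElem?_getD] at h3'
    refine ⟨h1, by omega, by omega, ?_⟩
    rw [(by omega : i + b = b + i), (by omega : j + a = a + j)]
    exact h3'
  · rintro ⟨h1, h2, h3, h4⟩
    refine ⟨h1, by omega, ?_⟩
    rw [List.getElem?_drop]
    show (B.getD (b + i) [])[a + j]? = some 1
    rw [List.getD_eq_getElem?_getD, (by omega : b + i = i + b), (by omega : a + j = j + a)]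
    exact h4

-- B's comprehension over one matrix, counted row by row
theorem countP_altOnes (M : List (List Int)) (p : Int × Int → Bool) :
    (altOnes M).countP p
      = ((List.range M.length).map (fun i =>
          (List.range (M.getD i []).length).countP (fun j =>
            ((if ((M.getD i []).getD j 0 == 1) then some ((i : Int), (j : Int)) else none).map
              p).getD false))).sum := by
  unfold altOnes
  rw [List.countP_flatMap,
      PySem.List.enumerate_eq_map_pyRange (d := ([] : List Int)),
      PySem.List.len_eq, PySem.List.pyRange_zero_natCast, List.map_map, List.map_map]
  apply congrArg
  apply List.map_congr_left
  intro i hi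
  simp only [Function.comp_def, PySem.List.pyGetD_natCast]
  rw [List.countP_filterMap,
      PySem.List.enumerate_eq_map_pyRange (d := (0 : Int)),
      PySem.List.len_eq, PySem.List.pyRange_zero_natCast, List.map_map, List.countP_map]
  simp only [Function.comp_def, PySem.List.pyGetD_natCast]

-- B's per-offset pass over the 1-cells of A, as the same canonical count
theorem alt_inner_eq (A B : List (List Int)) (a b : Nat) (_ha : a < A.length) (_hb : b < A.length) :
    (altOnes A).foldl
        (fun c ij => if ij.1 + (b : Int) < (A.length : Int) ∧ ij.2 + (a : Int) < (A.length : Int) ∧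
            (ij.1 + (b : Int), ij.2 + (a : Int)) ∈ PySem.Set.ofList (altOnes B) then c + 1 else c) 0
      = (((List.range A.length).map (fun i => fcnt B a b A.length i (A.getD i []))).sum : Int) := by
  rw [PySem.List.foldl_ite_add_one, zero_add]
  congr 1
  rw [countP_altOnes]
  apply congrArg
  apply List.map_congr_left
  intro i hi
  rw [List.mem_range] at hi
  unfold fcnt
  apply List.countP_congr
  intro j hj
  rw [List.mem_range] at hj
  have hval : (A.getD i []).getD j 0 = (A.getD i [])[j] := List.getD_eq_getElem _ _ hj
  have hval? : (A.getD i [])[j]? = some (A.getD i [])[j] := List.getElem?_eq_getElem hj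
  rw [hval]
  by_cases hv : (A.getD i [])[j] = (1 : Int)
  · rw [if_pos (by simpa using hv)]
    simp only [Option.map_some, Option.getD_some]
    simp only [decide_eq_true_eq]
    have hmem : ((i : Int) + (b : Int), (j : Int) + (a : Int)) ∈ PySem.Set.ofList (altOnes B)
        ↔ (B[i+b]?.getD [])[j+a]? = some 1 := by
      rw [PySem.Set.mem_ofList, mem_altOnes]
      constructor
      · rintro ⟨p, q, hpq, hcell⟩
        have hp : p = i + b := by
          have := congrArg Prod.fst hpq
          simp at this
          omega
        have hq : q = j + a := by
          have := congrArg Prod.snd hpq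
          simp at this
          omega
        rw [hp, hq] at hcell
        exact hcell
      · intro hcell
        exact ⟨i + b, j + a, by push_cast; rfl, hcell⟩
    rw [hmem]
    constructor
    · rintro ⟨h1, h2, h3⟩
      exact ⟨by rw [hval?, hv], by omega, by omega, h3⟩
    · rintro ⟨h1, h2, h3, h4⟩
      exact ⟨by omega, by omega, h4⟩
  · rw [if_neg (by simpa using hv)]
    simp only [Option.map_none, Option.getD_none, Bool.false_eq_true, false_iff,
      decide_eq_true_eq]
    rintro ⟨h1, -, -, -⟩
    rw [hval?] at h1
    exact hv (by simpa using h1)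

-- ===== VERDICT (by name: the statement is the Claim_ definition above) =====
theorem right_down_sums_spec : Claim_equal_right_down_sums := by
  intro A B _
  unfold Spec_right_down_sums right_down_sums right_down_sums_alt
  apply PySem.List.foldl_congr_mem
  intro acc d1 hd1
  apply PySem.List.foldl_congr_mem
  intro acc2 d2 hd2
  rw [PySem.List.mem_pyRange_one] at hd1 hd2
  by_cases h0 : d1 == 0 && d2 == 0
  · simp [h0]
  · simp only [h0]
    congr 1
    have ha : d1 = ((d1.toNat : Nat) : Int) := by omega
    have hb : d2 = ((d2.toNat : Nat) : Int) := by omega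
    rw [ha, hb]
    rw [pySum1_eq A B d1.toNat d2.toNat (by omega) (by omega),
        alt_inner_eq A B d1.toNat d2.toNat (by omega) (by omega)]
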